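-- pv_equiv track=rewrite | github.com/wthesen/alphabow | AlphabowRiskAssessmentV3.py | _analyze_ranking_changes
-- ===== SOURCE A (Python) =====
-- from typing import Dict, List, Tuple, Optional, Any, Union
--
-- def _analyze_ranking_changes(scenario_results: Dict) -> Dict[str, Any]:
--     """Analyze how rankings change between scenarios"""
--     baseline_rankings = {
--         asset: rank for rank, (asset, score) in
--         enumerate(scenario_results['baseline']['rankings'])
--     }
--
--     ranking_changes = {}
--     for scenario_name, scenario_data in scenario_results.items():
--         if scenario_name == 'baseline':
--             continue
--
--         scenario_rankings = {
--             asset: rank for rank, (asset, score) in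
--             enumerate(scenario_data['rankings'])
--         }
--
--         changes = {}
--         for asset in baseline_rankings:
--             if asset in scenario_rankings:
--                 change = baseline_rankings[asset] - scenario_rankings[asset]
--                 changes[asset] = change
--
--         ranking_changes[scenario_name] = changes
--
--     return ranking_changes
-- ===== SOURCE B (Python) =====
-- def _by_asset(rankings):
--     """(asset, rank) pairs of a ranking list, sorted by asset name."""
--     pairs = [(asset, rank) for rank, (asset, _score) in enumerate(rankings)]
--     pairs.sort(key=lambda p: p[0])
--     return pairs
--
-- def _merge_changes(base_sorted, scen_sorted):
--     """Two-pointer walk over two asset-sorted rank lists: (base_rank, asset, delta) per common asset."""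
--     triples = []
--     i = j = 0
--     while i < len(base_sorted) and j < len(scen_sorted):
--         a, br = base_sorted[i]
--         b, sr = scen_sorted[j]
--         if a == b:
--             triples.append((br, a, br - sr))
--             i += 1
--             j += 1
--         elif a < b:
--             i += 1
--         else:
--             j += 1
--     return triples
--
-- def _analyze_ranking_changes(scenario_results):
--     """Analyze how rankings change between scenarios"""
--     base_sorted = _by_asset(scenario_results['baseline']['rankings'])
--     ranking_changes = {}
--     for scenario_name, scenario_data in scenario_results.items():
--         if scenario_name == 'baseline':
--             continue
--         triples = _merge_changes(base_sorted, _by_asset(scenario_data['rankings']))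
--         triples.sort(key=lambda t: t[0])
--         ranking_changes[scenario_name] = {asset: delta for _rank, asset, delta in triples}
--     return ranking_changes
-- ===== Notes on version B (the rewrite author's own statement) =====
-- stated objective: alternative
-- what changed: B replaces A's two hash-indexed rank dictionaries and dict-intersection loop by a sort-and-merge: it sorts the (asset, rank) pairs of baseline and scenario by asset name, intersects them with a single two-pointer walk, and sorts the resulting deltas back into baseline-rank order; Pre_ excludes inputs whose ranking lists repeat an asset (A's keep-last dict-comprehension rank there is accidental) and association lists with duplicate dict keys or without the 'baseline'/'rankings' keys (not a representable dict / KeyError).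
import Mathlib
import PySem

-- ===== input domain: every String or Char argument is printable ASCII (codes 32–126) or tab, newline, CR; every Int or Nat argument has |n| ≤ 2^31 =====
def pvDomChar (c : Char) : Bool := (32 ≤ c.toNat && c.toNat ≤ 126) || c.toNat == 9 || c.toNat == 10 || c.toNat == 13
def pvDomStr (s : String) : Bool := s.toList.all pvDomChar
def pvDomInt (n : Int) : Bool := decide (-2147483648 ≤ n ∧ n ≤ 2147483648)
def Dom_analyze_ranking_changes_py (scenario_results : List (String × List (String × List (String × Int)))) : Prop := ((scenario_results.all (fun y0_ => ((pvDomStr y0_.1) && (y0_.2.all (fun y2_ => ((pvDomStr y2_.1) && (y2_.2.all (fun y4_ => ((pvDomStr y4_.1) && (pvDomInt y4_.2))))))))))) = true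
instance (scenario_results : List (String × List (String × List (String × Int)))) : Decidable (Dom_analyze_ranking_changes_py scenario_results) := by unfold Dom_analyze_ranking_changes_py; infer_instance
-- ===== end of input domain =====

-- B replaces A's hash-indexed rank dictionaries and dict-intersection loop by sort-and-merge:
-- sort both ranking lists by asset, intersect with one two-pointer walk, sort the deltas back
-- into baseline order (alternative algorithm, not faster).

-- ===== PORT A =====
-- {asset: rank for rank, (asset, score) in enumerate(rankings)}
def pvRankDict (l : List (String × Int)) : PySem.Dict String Int :=
  (PySem.List.enumerate l 0).foldl (fun d p => d.insert p.2.1 p.1) PySem.Dict.empty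

def analyze_ranking_changes_py (scenario_results : List (String × List (String × List (String × Int)))) : List (String × List (String × Int)) :=
  -- scenario_results['baseline']['rankings']; key presence is guaranteed by Pre_, getD [] is the total form
  let baseline_rankings := pvRankDict ((PySem.Dict.mk ((PySem.Dict.mk scenario_results).getD "baseline" [])).getD "rankings" [])
  (scenario_results.foldl
    (fun (acc : PySem.Dict String (List (String × Int))) sp =>
      if sp.1 == "baseline" then acc
      else
        let scenario_rankings := pvRankDict ((PySem.Dict.mk sp.2).getD "rankings" [])
        let changes := baseline_rankings.items.foldl
          (fun (c : PySem.Dict String Int) ar =>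
            if scenario_rankings.contains ar.1 then
              c.insert ar.1 (baseline_rankings.getD ar.1 0 - scenario_rankings.getD ar.1 0)
            else c)
          PySem.Dict.empty
        acc.insert sp.1 changes.items)
    PySem.Dict.empty).items

-- ===== PORT B =====
-- _by_asset: the (asset, rank) pairs of a ranking list, sorted by asset name
def pvByAsset (rankings : List (String × Int)) : List (String × Int) :=
  PySem.List.sorted ((PySem.List.enumerate rankings 0).map (fun p => (p.2.1, p.1))) (fun p => p.1) false

-- _merge_changes: two-pointer walk over two asset-sorted rank lists (the while loop as the
-- obvious structural recursion on the two lists)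
def pvMerge : List (String × Int) → List (String × Int) → List (Int × String × Int)
  | [], _ => []
  | _ :: _, [] => []
  | (a, br) :: xs, (b, sr) :: ys =>
    if a = b then (br, a, br - sr) :: pvMerge xs ys
    else if a < b then pvMerge xs ((b, sr) :: ys)
    else pvMerge ((a, br) :: xs) ys
termination_by xs ys => xs.length + ys.length

def analyze_ranking_changes_py_alt (scenario_results : List (String × List (String × List (String × Int)))) : List (String × List (String × Int)) :=
  let base_sorted := pvByAsset ((PySem.Dict.mk ((PySem.Dict.mk scenario_results).getD "baseline" [])).getD "rankings" [])
  (scenario_results.foldl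
    (fun (acc : PySem.Dict String (List (String × Int))) sp =>
      if sp.1 == "baseline" then acc
      else
        let triples := pvMerge base_sorted (pvByAsset ((PySem.Dict.mk sp.2).getD "rankings" []))
        let sortedTriples := PySem.List.sorted triples (fun t => t.1) false
        acc.insert sp.1 (sortedTriples.foldl (fun (d : PySem.Dict String Int) t => d.insert t.2.1 t.2.2) PySem.Dict.empty).items)
    PySem.Dict.empty).items

-- ===== PRECONDITION & SPEC =====
-- Pre_ excludes (i) when a non-baseline scenario exists, ranking lists that repeat an asset
-- name, on which A's keep-last dict-comprehension rank is an accident of the dict building;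
-- (ii) association lists whose 'baseline' or 'rankings' key is duplicated, which do not
-- represent the Python dict the programs read; (iii) inputs missing the 'baseline' scenario
-- or a 'rankings' key, on which A raises KeyError.
def Pre_analyze_ranking_changes_py (scenario_results : List (String × List (String × List (String × Int)))) : Prop :=
  (scenario_results.map (·.1)).count "baseline" ≤ 1 ∧
  "baseline" ∈ scenario_results.map (·.1) ∧
  (∀ p ∈ scenario_results, (p.2.map (·.1)).count "rankings" ≤ 1 ∧ "rankings" ∈ p.2.map (·.1)) ∧
  ((∃ p ∈ scenario_results, p.1 ≠ "baseline") →
    ∀ p ∈ scenario_results, ∀ q ∈ p.2, q.1 = "rankings" → (q.2.map (·.1)).Nodup)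
instance (scenario_results : List (String × List (String × List (String × Int)))) : Decidable (Pre_analyze_ranking_changes_py scenario_results) := by unfold Pre_analyze_ranking_changes_py; infer_instance

def pvWitness_analyze_ranking_changes_py : (List (String × List (String × List (String × Int)))) :=
  [("baseline", [("rankings", [("a", 10), ("b", 20)])]), ("s1", [("rankings", [("b", 5), ("a", 7)])])]

def Spec_analyze_ranking_changes_py (scenario_results : List (String × List (String × List (String × Int)))) (out : List (String × List (String × Int))) : Prop := out = analyze_ranking_changes_py_alt scenario_results
instance (scenario_results : List (String × List (String × List (String × Int)))) (out : List (String × List (String × Int))) : Decidable (Spec_analyze_ranking_changes_py scenario_results out) := by unfold Spec_analyze_ranking_changes_py; infer_instance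

-- ===== CLAIM (what is proved, stated in full; the proofs are below) =====
def Claim_equal_analyze_ranking_changes_py : Prop := ∀ (scenario_results : List (String × List (String × List (String × Int)))), Dom_analyze_ranking_changes_py scenario_results → Pre_analyze_ranking_changes_py scenario_results → Spec_analyze_ranking_changes_py scenario_results (analyze_ranking_changes_py scenario_results)

-- ===== LEMMAS AND PROOFS =====

def pvPairs (l : List (String × Int)) : List (String × Int) :=
  (PySem.List.enumerate l 0).map (fun p => (p.2.1, p.1))
def pvLk (ys : List (String × Int)) (a : String) : Option Int :=
  (ys.find? (fun q => q.1 == a)).map (·.2)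

theorem pvEnum_fst (l : List (String × Int)) : ∀ s : Int,
    ((PySem.List.enumerate l s).map (fun p => p.2.1)) = l.map (·.1) := by
  induction l with
  | nil => intro s; simp [PySem.List.enumerate_nil]
  | cons x t ih => intro s; simp [PySem.List.enumerate_cons, ih]

theorem pvPairs_fst (l : List (String × Int)) : (pvPairs l).map (·.1) = l.map (·.1) := by
  simpa [pvPairs, List.map_map, Function.comp_def] using pvEnum_fst l 0

theorem pvPairs_pairwise (l : List (String × Int)) :
    (pvPairs l).Pairwise (fun p q => p.2 < q.2) := by
  simp only [pvPairs, List.pairwise_map]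
  exact PySem.List.pairwise_lt_enumerate l 0

theorem pvRankDict_items_nodup (l : List (String × Int)) (h : (l.map (·.1)).Nodup) :
    (pvRankDict l).items = pvPairs l := by
  have hk : ((PySem.List.enumerate l 0).map (fun p => p.2.1)).Nodup := by
    rw [pvEnum_fst l 0]; exact h
  have := PySem.Dict.items_foldl_insert_fresh (l := PySem.List.enumerate l 0)
    (k := fun p => p.2.1) (v := fun p => p.1) (d := PySem.Dict.empty)
    (by intro a _; exact PySem.Dict.contains_empty _) hk
  simpa [pvRankDict, pvPairs] using this

theorem pvLk_eq_none_iff (ys : List (String × Int)) (a : String) :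
    pvLk ys a = none ↔ a ∉ ys.map (·.1) := by
  induction ys with
  | nil => simp [pvLk]
  | cons q t ih =>
    by_cases hq : q.1 = a
    · simp [pvLk, hq]
    · simp only [pvLk, List.find?_cons, show (q.1 == a) = false from beq_eq_false_iff_ne.mpr hq,
        List.map_cons, List.mem_cons]
      rw [show ((t.find? (fun p => p.1 == a)).map (·.2) = none) ↔ pvLk t a = none from Iff.rfl, ih]
      constructor
      · intro h hm; rcases hm with he | hm
        · exact hq he.symm
        · exact h hm
      · intro h hm; exact h (Or.inr hm)

theorem pvLk_eq_some_iff (ys : List (String × Int)) (a : String) (v : Int)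
    (h : (ys.map (·.1)).Nodup) : pvLk ys a = some v ↔ (a, v) ∈ ys := by
  induction ys with
  | nil => simp [pvLk]
  | cons q t ih =>
    simp only [List.map_cons, List.nodup_cons] at h
    by_cases hq : q.1 = a
    · simp only [pvLk, List.find?_cons, show (q.1 == a) = true from beq_iff_eq.mpr hq,
        Option.map_some, Option.some.injEq, List.mem_cons]
      constructor
      · intro hv; exact Or.inl (by rw [← hq, ← hv])
      · rintro (he | hm)
        · exact (congrArg Prod.snd he).symm
        · exact absurd (hq ▸ List.mem_map_of_mem hm (f := (·.1))) h.1
    · simp only [pvLk, List.find?_cons, show (q.1 == a) = false from beq_eq_false_iff_ne.mpr hq,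
        List.mem_cons]
      rw [show ((t.find? (fun p => p.1 == a)).map (·.2) = some v) ↔ pvLk t a = some v from Iff.rfl,
        ih h.2]
      constructor
      · exact Or.inr
      · rintro (he | hm)
        · exact absurd (congrArg Prod.fst he).symm hq
        · exact hm

theorem pvLk_perm (ys zs : List (String × Int)) (a : String)
    (h : (ys.map (·.1)).Nodup) (hp : ys.Perm zs) : pvLk ys a = pvLk zs a := by
  have hz : (zs.map (·.1)).Nodup := ((hp.map (·.1)).nodup_iff).mp h
  cases hys : pvLk ys a with
  | none =>
    have : a ∉ zs.map (·.1) := fun hm => by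
      have := (pvLk_eq_none_iff ys a).mp hys
      exact this ((hp.map (·.1)).mem_iff.mpr hm)
    exact ((pvLk_eq_none_iff zs a).mpr this).symm
  | some v =>
    have := (pvLk_eq_some_iff ys a v h).mp hys
    exact ((pvLk_eq_some_iff zs a v hz).mpr (hp.mem_iff.mp this)).symm

theorem pvByAsset_perm (l : List (String × Int)) : (pvByAsset l).Perm (pvPairs l) := by
  exact PySem.List.sorted_perm ..

theorem pvByAsset_pairwise (l : List (String × Int)) (h : (l.map (·.1)).Nodup) :
    (pvByAsset l).Pairwise (fun p q => p.1 < q.1) := by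
  have hle : (pvByAsset l).Pairwise (fun p q => p.1 ≤ q.1) :=
    PySem.List.sorted_pairwise ..
  have hnd : ((pvByAsset l).map (·.1)).Nodup := by
    have := ((pvByAsset_perm l).map (·.1)).nodup_iff
    rw [pvPairs_fst] at this
    exact this.mpr h
  have hne : (pvByAsset l).Pairwise (fun p q => p.1 ≠ q.1) := List.pairwise_map.mp hnd
  exact (hle.and hne).imp (fun hpq => lt_of_le_of_ne hpq.1 hpq.2)

theorem pvMerge_eq (xs ys : List (String × Int))
    (hx : xs.Pairwise (fun p q => p.1 < q.1)) (hy : ys.Pairwise (fun p q => p.1 < q.1)) :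
    pvMerge xs ys = xs.filterMap (fun p => (pvLk ys p.1).map (fun sr => (p.2, p.1, p.2 - sr))) := by
  revert hx hy
  induction xs, ys using pvMerge.induct with
  | case1 ys => intro _ _; simp [pvMerge]
  | case2 x xs => intro _ _; simp [pvMerge, pvLk]
  | case3 br xs a sr ys ih =>
    intro hx hy
    rw [pvMerge, if_pos rfl]
    have hfa : pvLk ((a, sr) :: ys) a = some sr := by simp [pvLk]
    rw [List.filterMap_cons]
    simp only [hfa, Option.map_some]
    congr 1
    rw [ih (List.Pairwise.sublist (List.sublist_cons_self _ _) hx)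
        (List.Pairwise.sublist (List.sublist_cons_self _ _) hy)]
    apply List.filterMap_congr
    intro p hp
    have hlt : a < p.1 := (List.pairwise_cons.mp hx).1 p hp
    have hne : (a == p.1) = false := beq_eq_false_iff_ne.mpr (ne_of_lt hlt)
    simp [pvLk, hne]
  | case4 a br xs b sr ys hne hlt ih =>
    intro hx hy
    rw [pvMerge, if_neg hne, if_pos hlt]
    rw [ih (List.Pairwise.sublist (List.sublist_cons_self _ _) hx) hy]
    rw [List.filterMap_cons]
    have hnone : pvLk ((b, sr) :: ys) a = none := by
      rw [pvLk_eq_none_iff]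
      simp only [List.map_cons, List.mem_cons]
      rintro (he | hm)
      · exact hne he
      · obtain ⟨q, hq, he⟩ := List.mem_map.mp hm
        have : b < q.1 := (List.pairwise_cons.mp hy).1 q hq
        exact absurd (he ▸ this) (not_lt.mpr (le_of_lt hlt))
    simp [hnone]
  | case5 a br xs b sr ys hne hnlt ih =>
    intro hx hy
    rw [pvMerge, if_neg hne, if_neg hnlt]
    have hgt : b < a := by
      rcases lt_trichotomy a b with h | h | h
      · exact absurd h hnlt
      · exact absurd h hne
      · exact h
    rw [ih hx (List.Pairwise.sublist (List.sublist_cons_self _ _) hy)]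
    apply List.filterMap_congr
    intro p hp
    have hge : b < p.1 := by
      rcases List.mem_cons.mp hp with he | hm
      · exact he ▸ hgt
      · exact lt_trans hgt ((List.pairwise_cons.mp hx).1 p hm)
    have hb : (b == p.1) = false := beq_eq_false_iff_ne.mpr (ne_of_lt hge)
    simp [pvLk, hb]

theorem pvFilterMap_lk (xs ys : List (String × Int)) :
    xs.filterMap (fun p => (pvLk ys p.1).map (fun sr => (p.2, p.1, p.2 - sr)))
      = (xs.filter (fun p => decide (p.1 ∈ ys.map (·.1)))).map
          (fun p => (p.2, p.1, p.2 - (pvLk ys p.1).getD 0)) := by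
  induction xs with
  | nil => simp
  | cons p t ih =>
    rw [List.filterMap_cons, List.filter_cons]
    cases hlk : pvLk ys p.1 with
    | none =>
      have hm : p.1 ∉ ys.map (·.1) := (pvLk_eq_none_iff ys p.1).mp hlk
      simp [hm, ih]
    | some v =>
      have hm : p.1 ∈ ys.map (·.1) := by
        by_contra hc
        rw [← pvLk_eq_none_iff ys p.1] at hc
        rw [hc] at hlk; simp at hlk
      simp [hlk, hm, ih]

theorem pvByAsset_fst_nodup (l : List (String × Int)) (h : (l.map (·.1)).Nodup) :
    ((pvByAsset l).map (·.1)).Nodup := by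
  have := ((pvByAsset_perm l).map (·.1)).nodup_iff
  rw [pvPairs_fst] at this
  exact this.mpr h

theorem pv_changes_eq (b r : List (String × Int))
    (hb : (b.map (·.1)).Nodup) (hr : (r.map (·.1)).Nodup) :
    ((pvRankDict b).items.foldl
        (fun (c : PySem.Dict String Int) ar =>
          if (pvRankDict r).contains ar.1 then
            c.insert ar.1 ((pvRankDict b).getD ar.1 0 - (pvRankDict r).getD ar.1 0)
          else c)
        PySem.Dict.empty).items
      = ((PySem.List.sorted (pvMerge (pvByAsset b) (pvByAsset r)) (fun t => t.1) false).foldl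
          (fun (d : PySem.Dict String Int) t => d.insert t.2.1 t.2.2) PySem.Dict.empty).items := by
  have hEnodup : ((pvPairs b).map (·.1)).Nodup := by rw [pvPairs_fst]; exact hb
  have hRnodup : ((pvPairs r).map (·.1)).Nodup := by rw [pvPairs_fst]; exact hr
  have hBkeysnd : (pvRankDict b).keys.Nodup := by
    show ((pvRankDict b).items.map (·.1)).Nodup
    rw [pvRankDict_items_nodup b hb]; exact hEnodup
  have hRkeysnd : (pvRankDict r).keys.Nodup := by
    show ((pvRankDict r).items.map (·.1)).Nodup
    rw [pvRankDict_items_nodup r hr]; exact hRnodup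
  have hcont : ∀ a : String, (pvRankDict r).contains a = decide (a ∈ r.map (·.1)) := by
    intro a
    rw [PySem.Dict.contains_eq_decide_mem_keys]
    congr 1
    show (a ∈ (pvRankDict r).items.map (·.1)) = _
    rw [pvRankDict_items_nodup r hr, pvPairs_fst]
  have hgetB : ∀ ar ∈ pvPairs b, (pvRankDict b).getD ar.1 0 = ar.2 := by
    intro ar h
    exact PySem.Dict.getD_of_mem_items _ (by rw [pvRankDict_items_nodup b hb]; exact h) hBkeysnd 0
  have hgetR : ∀ a : String, a ∈ r.map (·.1) →
      (pvRankDict r).getD a 0 = (pvLk (pvPairs r) a).getD 0 := by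
    intro a ha
    have ha' : a ∈ (pvPairs r).map (·.1) := by rw [pvPairs_fst]; exact ha
    obtain ⟨p, hp, hp1⟩ := List.mem_map.mp ha'
    have hmem : (a, p.2) ∈ pvPairs r := by rw [← hp1]; exact hp
    have h1 : (pvRankDict r).getD a 0 = p.2 :=
      PySem.Dict.getD_of_mem_items _ (by rw [pvRankDict_items_nodup r hr]; exact hmem) hRkeysnd 0
    have h2 : pvLk (pvPairs r) a = some p.2 := (pvLk_eq_some_iff _ _ _ hRnodup).mpr hmem
    rw [h1, h2]; rfl
  -- LHS
  rw [pvRankDict_items_nodup b hb,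
    PySem.List.foldl_if_eq_foldl_filter (fun ar => (pvRankDict r).contains ar.1)
      (fun (c : PySem.Dict String Int) ar =>
        c.insert ar.1 ((pvRankDict b).getD ar.1 0 - (pvRankDict r).getD ar.1 0))
      (pvPairs b) PySem.Dict.empty]
  have hsubl : ((pvPairs b).filter (fun ar => (pvRankDict r).contains ar.1)).Sublist (pvPairs b) :=
    List.filter_sublist
  rw [PySem.Dict.items_foldl_insert_fresh
    ((pvPairs b).filter (fun ar => (pvRankDict r).contains ar.1))
    (fun ar => ar.1)
    (fun ar => (pvRankDict b).getD ar.1 0 - (pvRankDict r).getD ar.1 0)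
    PySem.Dict.empty
    (fun a _ => PySem.Dict.contains_empty _)
    ((hsubl.map (·.1)).nodup hEnodup)]
  -- RHS
  rw [pvMerge_eq _ _ (pvByAsset_pairwise b hb) (pvByAsset_pairwise r hr)]
  have hlkp : ∀ p : String × Int,
      (pvLk (pvByAsset r) p.1).map (fun sr => (p.2, p.1, p.2 - sr))
        = (pvLk (pvPairs r) p.1).map (fun sr => (p.2, p.1, p.2 - sr)) := by
    intro p
    rw [pvLk_perm (pvByAsset r) (pvPairs r) p.1 (pvByAsset_fst_nodup r hr) (pvByAsset_perm r)]
  rw [List.filterMap_congr (fun p _ => hlkp p)]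
  have hperm : ((pvPairs b).filterMap
        (fun p => (pvLk (pvPairs r) p.1).map (fun sr => (p.2, p.1, p.2 - sr)))).Perm
      ((pvByAsset b).filterMap
        (fun p => (pvLk (pvPairs r) p.1).map (fun sr => (p.2, p.1, p.2 - sr)))) :=
    ((pvByAsset_perm b).symm).filterMap _
  have hpair : ((pvPairs b).filterMap
        (fun p => (pvLk (pvPairs r) p.1).map (fun sr => (p.2, p.1, p.2 - sr)))).Pairwise
      (fun s t => s.1 < t.1) := by
    rw [pvFilterMap_lk]
    rw [List.pairwise_map]
    exact ((pvPairs_pairwise b).filter _)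
  rw [PySem.List.sorted_eq_of_perm_of_pairwise_lt _ _ _ hperm hpair]
  rw [pvFilterMap_lk, pvPairs_fst r]
  have hknd2 : ((((pvPairs b).filter (fun p => decide (p.1 ∈ r.map (·.1)))).map
      (fun p => (p.2, p.1, p.2 - (pvLk (pvPairs r) p.1).getD 0))).map (fun t => t.2.1)).Nodup := by
    rw [List.map_map]
    exact ((List.filter_sublist.map _).nodup hEnodup)
  rw [PySem.Dict.items_foldl_insert_fresh
    (((pvPairs b).filter (fun p => decide (p.1 ∈ r.map (·.1)))).map
      (fun p => (p.2, p.1, p.2 - (pvLk (pvPairs r) p.1).getD 0)))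
    (fun t => t.2.1) (fun t => t.2.2) PySem.Dict.empty
    (fun a _ => PySem.Dict.contains_empty _) hknd2]
  rw [List.map_map]
  -- both sides are maps over (essentially) the same filtered list
  rw [List.filter_congr (fun ar _ => hcont ar.1)]
  simp only [show (PySem.Dict.empty : PySem.Dict String Int).items = [] from rfl, List.nil_append]
  apply List.map_congr_left
  intro p hp
  have hpE : p ∈ pvPairs b := List.mem_of_mem_filter hp
  have hpr : p.1 ∈ r.map (·.1) := by
    have := (List.mem_filter.mp hp).2
    exact of_decide_eq_true this
  show (p.1, (pvRankDict b).getD p.1 0 - (pvRankDict r).getD p.1 0) = _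
  rw [hgetB p hpE, hgetR p.1 hpr]
  rfl

-- first-match lookup in a raw association list whose key k occurs at most once
theorem pvGetD_mk {ν : Type} (l : List (String × ν)) (k : String) (v : ν) (d0 : ν)
    (hc : (l.map (·.1)).count k ≤ 1) (hm : (k, v) ∈ l) : (PySem.Dict.mk l).getD k d0 = v := by
  induction l with
  | nil => cases hm
  | cons q t ih =>
    rw [PySem.Dict.getD_eq_get?_getD, PySem.Dict.get?_mk_cons]
    by_cases hq : q.1 = k
    · have hkt : k ∉ t.map (·.1) := by
        intro hkt
        have : 2 ≤ ((q :: t).map (·.1)).count k := by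
          rw [List.map_cons, List.count_cons]
          simp only [hq, beq_self_eq_true, if_true]
          have := List.one_le_count_iff.mpr hkt
          omega
        omega
      rcases List.mem_cons.mp hm with he | hmt
      · rw [show (q.1 == k) = true from beq_iff_eq.mpr hq]
        rw [← he]; simp
      · exact absurd (List.mem_map_of_mem hmt (f := (·.1))) hkt
    · rw [show (q.1 == k) = false from beq_eq_false_iff_ne.mpr hq]
      simp only [Bool.false_eq_true, if_false]
      have hct : (t.map (·.1)).count k ≤ 1 := by
        rw [List.map_cons, List.count_cons] at hc
        omega
      have hmt : (k, v) ∈ t := by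
        rcases List.mem_cons.mp hm with he | hmt
        · exact absurd (congrArg Prod.fst he).symm hq
        · exact hmt
      rw [← PySem.Dict.getD_eq_get?_getD]
      exact ih hct hmt

theorem main_spec : ∀ (sr : List (String × List (String × List (String × Int)))),
    ((sr.map (·.1)).count "baseline" ≤ 1 ∧ "baseline" ∈ sr.map (·.1) ∧
      (∀ p ∈ sr, (p.2.map (·.1)).count "rankings" ≤ 1 ∧ "rankings" ∈ p.2.map (·.1)) ∧
      ((∃ p ∈ sr, p.1 ≠ "baseline") →
        ∀ p ∈ sr, ∀ q ∈ p.2, q.1 = "rankings" → (q.2.map (·.1)).Nodup)) →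
    analyze_ranking_changes_py sr = analyze_ranking_changes_py_alt sr := by
  intro sr hpre
  obtain ⟨hnd, hbmem, hkeys, hcond⟩ := hpre
  simp only [analyze_ranking_changes_py, analyze_ranking_changes_py_alt]
  congr 1
  apply PySem.List.foldl_congr_mem
  intro acc sp hsp
  cases hb : (sp.1 == "baseline") with
  | true => simp only [if_true]
  | false =>
    have hsp1 : sp.1 ≠ "baseline" := by
      intro h; rw [h] at hb; simp at hb
    have hall := hcond ⟨sp, hsp, hsp1⟩
    have hrk : ∀ p ∈ sr, (((PySem.Dict.mk p.2).getD "rankings" []).map (·.1)).Nodup := by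
      intro p hp
      obtain ⟨hnd2, hmem2⟩ := hkeys p hp
      obtain ⟨q, hq, hq1⟩ := List.mem_map.mp hmem2
      have hv : (PySem.Dict.mk p.2).getD "rankings" [] = q.2 :=
        pvGetD_mk _ _ _ _ hnd2 (by rw [← hq1]; exact hq)
      rw [hv]; exact hall p hp q hq hq1
    obtain ⟨pb, hpb, hpb1⟩ := List.mem_map.mp hbmem
    have hblv : (PySem.Dict.mk sr).getD "baseline" [] = pb.2 :=
      pvGetD_mk _ _ _ _ hnd (by rw [← hpb1]; exact hpb)
    have hbl : (((PySem.Dict.mk ((PySem.Dict.mk sr).getD "baseline" [])).getD "rankings" []).map (·.1)).Nodup := by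
      rw [hblv]; exact hrk pb hpb
    simp only [Bool.false_eq_true, if_false]
    congr 1
    exact pv_changes_eq _ _ hbl (hrk sp hsp)

-- ===== VERDICT (by name: the statement is the Claim_ definition above) =====
theorem analyze_ranking_changes_py_spec : Claim_equal_analyze_ranking_changes_py := by
  intro scenario_results _ hpre
  exact main_spec scenario_results hpre
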